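-- pv_equiv track=rewrite | github.com/dennikey/Auto-Recruiter-Emailer | organizer.py | email_grouper
-- ===== SOURCE A (Python) =====
-- def email_grouper(text_input1, text_input2):
--     final_list = []
--     acc = 0
--
--     for i in range(len(text_input1)):
--         sub_list = []
--         j = acc
--
--         if i == (len(text_input1) - 1):
--             return final_list
--
--         while text_input1[i+1] != text_input2[j]:
--             sub_list.append(text_input2[j])
--             j += 1
--             acc = j
--
--         final_list.append(sub_list)
--
--     return final_list
-- ===== SOURCE B (Python) =====
-- def email_grouper(text_input1, text_input2):
--     # Two-pass: first compute the boundary positions of each delimiter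
--     # (each search starts at the previous matched index, inclusive),
--     # then cut text_input2 into adjacent slices between boundaries.
--     bounds = [0]
--     p = 0
--     for k in range(1, len(text_input1)):
--         while text_input2[p] != text_input1[k]:
--             p += 1
--         bounds.append(p)
--     return [text_input2[a:b] for a, b in zip(bounds, bounds[1:])]
-- ===== Notes on version B (the rewrite author's own statement) =====
-- stated objective: alternative
-- what changed: B replaces A's single loop that accumulates sub-lists element by element (with an early-return and a carried 'acc' cursor) by a two-pass decomposition: first a boundary-position table of delimiter match indices, then slicing text_input2 between adjacent boundaries.
import Mathlib
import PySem

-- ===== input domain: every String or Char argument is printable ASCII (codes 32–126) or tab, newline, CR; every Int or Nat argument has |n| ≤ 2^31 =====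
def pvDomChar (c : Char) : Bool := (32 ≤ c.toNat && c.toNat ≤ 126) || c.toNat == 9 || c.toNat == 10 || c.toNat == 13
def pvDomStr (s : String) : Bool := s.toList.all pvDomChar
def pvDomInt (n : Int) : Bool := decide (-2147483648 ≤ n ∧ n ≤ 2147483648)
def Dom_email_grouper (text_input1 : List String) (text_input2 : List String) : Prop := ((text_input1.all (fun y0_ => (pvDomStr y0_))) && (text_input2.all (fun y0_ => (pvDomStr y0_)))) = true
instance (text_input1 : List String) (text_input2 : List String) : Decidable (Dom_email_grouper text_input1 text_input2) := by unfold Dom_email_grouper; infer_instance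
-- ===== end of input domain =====

-- ===== PORT A =====
-- B differs from A by decomposition: A builds the groups in one pass; B builds a
-- boundary table, then slices. Equivalence is about the return value on inputs
-- where the Python A returns (Pre_ excludes the IndexError inputs; A mutates nothing).
-- helper for A's inner while loop: scan l collecting elements until `target`
-- is found; returns (collected prefix, its length); none = IndexError.
def scanUntilA (target : String) : List String → Option (List String × Nat)
  | [] => none
  | x :: xs =>
    if x = target then some ([], 0)
    else (scanUntilA target xs).map (fun sn => (x :: sn.1, sn.2 + 1))

-- A's for-loop over i in range(len(text_input1)), carrying (acc, final_list);
-- the while loop is scanUntilA on text_input2.drop acc; on IndexError (none,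
-- outside Pre_) the port just stops with the list built so far.
def goA (t1 t2 : List String) : List Nat → Nat → List (List String) → List (List String)
  | [], _, final => final
  | i :: rest, acc, final =>
    if i = t1.length - 1 then final
    else
      match scanUntilA (t1.getD (i + 1) "") (t2.drop acc) with
      | none => final
      | some sn => goA t1 t2 rest (acc + sn.2) (final ++ [sn.1])

def email_grouper (text_input1 : List String) (text_input2 : List String) : List (List String) :=
  goA text_input1 text_input2 (List.range text_input1.length) 0 []

-- ===== PORT B =====
-- Source B's inner while loop: offset of the first occurrence of `target`;
-- none = IndexError.
def findFromB (target : String) : List String → Option Nat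
  | [] => none
  | x :: xs => if x = target then some 0 else (findFromB target xs).map (· + 1)

-- Source B's first pass: for k in range(1, len(t1)) find t1[k] from p (inclusive)
-- and append the match position to bounds.
def loopB (t2 : List String) : List String → Nat → List Nat → List Nat
  | [], _, bounds => bounds
  | t :: ts, p, bounds =>
    match findFromB t (t2.drop p) with
    | none => bounds
    | some off => loopB t2 ts (p + off) (bounds ++ [p + off])

-- Source B's second pass: [t2[a:b] for a, b in zip(bounds, bounds[1:])]
def email_grouper_alt (text_input1 : List String) (text_input2 : List String) : List (List String) :=
  let bounds := loopB text_input2 (text_input1.drop 1) 0 [0]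
  (bounds.zip bounds.tail).map (fun ab => PySem.List.slice text_input2 (some (ab.1 : Int)) (some (ab.2 : Int)))

-- ===== PRECONDITION & SPEC =====
-- Pre_ excludes exactly the inputs on which Python A raises IndexError: every
-- delimiter of text_input1[1:] must be found scanning text_input2 left to right
-- (re-examining the matched element), i.e. text_input1[1:] with consecutive
-- duplicate runs collapsed must be a sublist of text_input2.
def Pre_email_grouper (text_input1 : List String) (text_input2 : List String) : Prop :=
  ((text_input1.drop 1).destutter (· ≠ ·)).Sublist text_input2

instance (text_input1 : List String) (text_input2 : List String) : Decidable (Pre_email_grouper text_input1 text_input2) := by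
  unfold Pre_email_grouper; infer_instance

def pvWitness_email_grouper : List String × List String :=
  (["a", "b", "c"], ["x", "b", "y", "c"])

def Spec_email_grouper (text_input1 : List String) (text_input2 : List String) (out : List (List String)) : Prop := out = email_grouper_alt text_input1 text_input2
instance (text_input1 : List String) (text_input2 : List String) (out : List (List String)) : Decidable (Spec_email_grouper text_input1 text_input2 out) := by unfold Spec_email_grouper; infer_instance

-- ===== CLAIM (what is proved, stated in full; the proofs are below) =====
def Claim_equal_email_grouper : Prop := ∀ (text_input1 : List String) (text_input2 : List String), Dom_email_grouper text_input1 text_input2 → Pre_email_grouper text_input1 text_input2 → Spec_email_grouper text_input1 text_input2 (email_grouper text_input1 text_input2)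

-- ===== LEMMAS AND PROOFS =====

-- common characterisation: the groups produced by one greedy chain of searches
def groupsC (t2 : List String) : List String → Nat → List (List String)
  | [], _ => []
  | t :: ts, p =>
    match findFromB t (t2.drop p) with
    | none => []
    | some off => (t2.drop p).take off :: groupsC t2 ts (p + off)

theorem scanUntilA_eq_findFromB (t : String) (l : List String) :
    scanUntilA t l = (findFromB t l).map (fun n => (l.take n, n)) := by
  induction l with
  | nil => simp [scanUntilA, findFromB]
  | cons x xs ih =>
    by_cases h : x = t
    · simp [scanUntilA, findFromB, h]
    · simp only [scanUntilA, findFromB, if_neg h, ih]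
      cases findFromB t xs <;> simp

theorem goA_eq_groupsC (t1 t2 : List String) :
    ∀ (k i : Nat) (acc : Nat) (final : List (List String)), i + k = t1.length →
      goA t1 t2 (List.range' i k) acc final = final ++ groupsC t2 (t1.drop (i + 1)) acc := by
  intro k
  induction k with
  | zero =>
    intro i acc final h
    have : t1.drop (i + 1) = [] := List.drop_eq_nil_of_le (by omega)
    simp [goA, this, groupsC]
  | succ k ih =>
    intro i acc final h
    rw [List.range'_succ]
    by_cases hi : i = t1.length - 1
    · subst hi
      have hd : t1.drop (t1.length - 1 + 1) = [] := List.drop_eq_nil_of_le (by omega)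
      simp [goA, hd, groupsC]
    · have hlt : i + 1 < t1.length := by omega
      have hdrop : t1.drop (i + 1) = t1[i + 1] :: t1.drop (i + 2) :=
        List.drop_eq_getElem_cons hlt
      have hgetD : t1.getD (i + 1) "" = t1[i + 1] := List.getD_eq_getElem t1 "" hlt
      simp only [goA, if_neg hi, hgetD, scanUntilA_eq_findFromB, hdrop, groupsC]
      cases hf : findFromB t1[i + 1] (t2.drop acc) with
      | none => simp
      | some off =>
        simp only [Option.map_some]
        rw [ih (i + 1) (acc + off) (final ++ [(t2.drop acc).take off]) (by omega)]
        simp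

-- the tail positions produced by loopB from an empty accumulator
def posList (t2 : List String) : List String → Nat → List Nat
  | [], _ => []
  | t :: ts, p =>
    match findFromB t (t2.drop p) with
    | none => []
    | some off => (p + off) :: posList t2 ts (p + off)

theorem loopB_eq_posList (t2 : List String) :
    ∀ (ts : List String) (p : Nat) (bounds : List Nat),
      loopB t2 ts p bounds = bounds ++ posList t2 ts p := by
  intro ts
  induction ts with
  | nil => intro p bounds; simp [loopB, posList]
  | cons t ts ih =>
    intro p bounds
    cases hf : findFromB t (t2.drop p) with
    | none => simp [loopB, posList, hf]
    | some off => simp [loopB, posList, hf, ih]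

theorem pairSlices_posList (t2 : List String) :
    ∀ (ts : List String) (p : Nat),
      (((p :: posList t2 ts p).zip (posList t2 ts p)).map
        (fun ab => PySem.List.slice t2 (some (ab.1 : Int)) (some (ab.2 : Int)))) =
      groupsC t2 ts p := by
  intro ts
  induction ts with
  | nil => intro p; simp [posList, groupsC]
  | cons t ts ih =>
    intro p
    cases hf : findFromB t (t2.drop p) with
    | none => simp [posList, groupsC, hf]
    | some off =>
      simp only [posList, groupsC, hf, List.zip_cons_cons, List.map_cons]
      rw [ih (p + off)]
      congr 1
      have : ((p : Int) + (off : Int)) = ((p + off : Nat) : Int) := by push_cast; ring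
      rw [← this, PySem.List.slice_natCast_add]

theorem alt_eq_groupsC (t1 t2 : List String) :
    email_grouper_alt t1 t2 = groupsC t2 (t1.drop 1) 0 := by
  unfold email_grouper_alt
  rw [loopB_eq_posList]
  have h0 : ([0] : List Nat) ++ posList t2 (t1.drop 1) 0 = 0 :: posList t2 (t1.drop 1) 0 := by simp
  rw [h0]
  have := pairSlices_posList t2 (t1.drop 1) 0
  simpa using this

theorem a_eq_groupsC (t1 t2 : List String) :
    email_grouper t1 t2 = groupsC t2 (t1.drop 1) 0 := by
  unfold email_grouper
  rw [List.range_eq_range']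
  simpa using goA_eq_groupsC t1 t2 t1.length 0 0 [] (by omega)

-- ===== VERDICT (by name: the statement is the Claim_ definition above) =====
theorem email_grouper_spec : Claim_equal_email_grouper := by
  intro t1 t2 _ _
  unfold Spec_email_grouper
  rw [a_eq_groupsC, alt_eq_groupsC]
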